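-- pv_equiv track=rewrite | github.com/yimmyj/aoc2023 | 3/3.1.py | find_number_indices
-- ===== SOURCE A (Python) =====
-- def find_number_indices(line):
--     result = []
--     start_index = None
--
--     for i, char in enumerate(line):
--         if char.isdigit():
--             if start_index is None:
--                 start_index = i
--         elif start_index is not None:
--             result.append([start_index, i - 1])
--             start_index = None
--
--     # Check if a number extends to the end of the string
--     if start_index is not None:
--         result.append([start_index, len(line) - 1])
--
--     return result
-- ===== SOURCE B (Python) =====
-- def find_number_indices(line):
--     # Two-pointer run scan: jump from run to run instead of a per-char state machine.
--     result = []
--     i, n = 0, len(line)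
--     while i < n:
--         if line[i].isdigit():
--             j = i
--             while j + 1 < n and line[j + 1].isdigit():
--                 j += 1
--             result.append([i, j])
--             i = j + 1
--         else:
--             i += 1
--     return result
-- ===== Notes on version B (the rewrite author's own statement) =====
-- stated objective: alternative
-- what changed: Replaces the start_index/None state machine over enumerate (with an end-of-string fixup) with a two-pointer run scan: find the start of a digit run, scan to its end with an inner loop, emit [start, end], and jump past the run; no sentinel state or terminal special case.
import Mathlib
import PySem

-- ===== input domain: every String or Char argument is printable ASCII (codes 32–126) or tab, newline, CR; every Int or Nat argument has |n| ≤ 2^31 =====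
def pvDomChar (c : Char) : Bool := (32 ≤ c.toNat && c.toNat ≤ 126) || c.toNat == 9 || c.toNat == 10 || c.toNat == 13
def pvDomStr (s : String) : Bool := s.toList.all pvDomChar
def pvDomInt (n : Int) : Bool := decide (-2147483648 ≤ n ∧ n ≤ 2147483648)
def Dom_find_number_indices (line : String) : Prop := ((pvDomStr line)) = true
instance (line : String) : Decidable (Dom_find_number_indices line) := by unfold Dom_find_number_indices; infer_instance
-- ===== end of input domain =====

-- B replaces A's start_index/None state machine with a two-pointer run scan (alternative decomposition, same cost).

-- ===== PORT A =====
-- loop body of A's for-loop: state = (result, start_index)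
def pvStep (st : List (List Int) × Option Int) (ic : Int × Char) :
    List (List Int) × Option Int :=
  if PySem.Chars.isdigit ic.2 then
    match st.2 with
    | none => (st.1, some ic.1)
    | some _ => st
  else
    match st.2 with
    | some s => (st.1 ++ [[s, ic.1 - 1]], none)
    | none => st

-- the trailing "number extends to the end" check
def pvFinish (st : List (List Int) × Option Int) (n : Int) : List (List Int) :=
  match st.2 with
  | some s => st.1 ++ [[s, n - 1]]
  | none => st.1

def find_number_indices (line : String) : List (List Int) :=
  pvFinish ((PySem.List.enumerate line.toList 0).foldl pvStep ([], none))
    (line.toList.length : Int)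

-- ===== PORT B =====
-- inner while: extend j while the next char is a digit; returns (j, chars after j)
def pvRun : List Char → Int → Int × List Char
  | [], j => (j, [])
  | c :: rest, j =>
    if PySem.Chars.isdigit c then pvRun rest (j + 1) else (j, c :: rest)

theorem pvRun_length_le : ∀ (cs : List Char) (j : Int), (pvRun cs j).2.length ≤ cs.length := by
  intro cs
  induction cs with
  | nil => intro j; simp [pvRun]
  | cons c rest ih =>
    intro j
    simp only [pvRun]
    split
    · exact le_trans (ih (j + 1)) (by simp)
    · simp

-- outer while over the remaining characters, i = index of the head
def pvGo : List Char → Int → List (List Int)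
  | [], _ => []
  | c :: rest, i =>
    if PySem.Chars.isdigit c then
      let r := pvRun rest i
      [i, r.1] :: pvGo r.2 (r.1 + 1)
    else
      pvGo rest (i + 1)
termination_by cs _ => cs.length
decreasing_by
  · have := pvRun_length_le rest i; simp; omega
  · simp

def find_number_indices_alt (line : String) : List (List Int) :=
  pvGo line.toList 0

-- ===== PRECONDITION & SPEC =====
def Spec_find_number_indices (line : String) (out : List (List Int)) : Prop := out = find_number_indices_alt line
instance (line : String) (out : List (List Int)) : Decidable (Spec_find_number_indices line out) := by unfold Spec_find_number_indices; infer_instance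

-- ===== CLAIM (what is proved, stated in full; the proofs are below) =====
def Claim_equal_find_number_indices : Prop := ∀ (line : String), Dom_find_number_indices line → Spec_find_number_indices line (find_number_indices line)

-- ===== LEMMAS AND PROOFS =====

-- combined invariant, strong induction on the length of the remaining suffix:
-- with start_index = None the fold computes pvGo; with start_index = some s it
-- computes the current run via pvRun and continues as pvGo.
theorem pv_key : ∀ (n : Nat) (cs : List Char), cs.length ≤ n → ∀ (i : Int) (acc : List (List Int)),
    (pvFinish ((PySem.List.enumerate cs i).foldl pvStep (acc, none)) (i + cs.length)
       = acc ++ pvGo cs i)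
    ∧ ∀ (s : Int),
      pvFinish ((PySem.List.enumerate cs i).foldl pvStep (acc, some s)) (i + cs.length)
        = acc ++ [[s, (pvRun cs (i - 1)).1]]
            ++ pvGo (pvRun cs (i - 1)).2 ((pvRun cs (i - 1)).1 + 1) := by
  intro n
  induction n with
  | zero =>
    intro cs hcs i acc
    have : cs = [] := List.eq_nil_of_length_eq_zero (Nat.le_zero.mp hcs)
    subst this
    simp [PySem.List.enumerate_nil, pvFinish, pvGo, pvRun]
  | succ m ih =>
    intro cs hcs i acc
    cases cs with
    | nil => simp [PySem.List.enumerate_nil, pvFinish, pvGo, pvRun]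
    | cons c rest =>
      have hr : rest.length ≤ m := by simp at hcs; omega
      have hlen : i + ((c :: rest).length : Int) = (i + 1) + (rest.length : Int) := by
        simp; omega
      by_cases hd : PySem.Chars.isdigit c = true
      · constructor
        · -- none-state, digit head: start a run
          rw [PySem.List.enumerate_cons, List.foldl_cons, hlen]
          have h2 := ((ih rest hr (i + 1) acc).2 i)
          rw [show (i + 1 - 1 : Int) = i by omega] at h2
          rw [show pvStep (acc, none) (i, c) = (acc, some i) by simp [pvStep, hd], h2]
          simp [pvGo, hd]
        · -- some-state, digit head: run continues
          intro s
          rw [PySem.List.enumerate_cons, List.foldl_cons, hlen]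
          have h2 := ((ih rest hr (i + 1) acc).2 s)
          rw [show (i + 1 - 1 : Int) = i by omega] at h2
          rw [show pvStep (acc, some s) (i, c) = (acc, some s) by simp [pvStep, hd],
            show pvRun (c :: rest) (i - 1) = pvRun rest i by
              simp [pvRun, hd, show (i - 1 + 1 : Int) = i by omega], h2]
      · constructor
        · -- none-state, non-digit head: skip
          rw [PySem.List.enumerate_cons, List.foldl_cons, hlen]
          have h1 := (ih rest hr (i + 1) acc).1
          rw [show pvStep (acc, none) (i, c) = (acc, none) by simp [pvStep, hd], h1]
          simp [pvGo, hd]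
        · -- some-state, non-digit head: close the run here
          intro s
          rw [PySem.List.enumerate_cons, List.foldl_cons, hlen]
          have h1 := (ih rest hr (i + 1) (acc ++ [[s, i - 1]])).1
          rw [show pvStep (acc, some s) (i, c) = (acc ++ [[s, i - 1]], none) by
              simp [pvStep, hd], h1,
            show pvRun (c :: rest) (i - 1) = (i - 1, c :: rest) by simp [pvRun, hd]]
          simp [pvGo, hd, show (i - 1 + 1 : Int) = i by omega]

-- ===== VERDICT (by name: the statement is the Claim_ definition above) =====
theorem find_number_indices_spec : Claim_equal_find_number_indices := by
  intro line _
  unfold Spec_find_number_indices find_number_indices find_number_indices_alt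
  have h := (pv_key line.toList.length line.toList le_rfl 0 []).1
  simpa using h
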